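-- pv_equiv track=rewrite | github.com/hxrain/scutil | py/uni_blocks.py | with_numalp
-- ===== SOURCE A (Python) =====
-- def is_number_char(char):
--     """判断字符是否为十进制数字字符"""
--     return char >= '0' and char <= '9'
--
-- def is_english_lc(char):
--     """判断是否为英文小写字符"""
--     return char >= 'a' and char <= 'z'
--
-- def is_english_cl(char):
--     """判断是否为英文大写字符"""
--     return char >= 'A' and char <= 'Z'
--
-- def is_alpha_num(char):
--     """判断是否为数字与英文字母"""
--     return is_number_char(char) or is_english_lc(char) or is_english_cl(char)
--
-- def with_numalp(s):
--     """查找字符串s前后两端的数字与字母的数量"""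
--     sl = len(s)
--     hc = 0
--     tc = 0
--     for i in range(sl):
--         if is_alpha_num(s[i]):
--             hc += 1
--         else:
--             break
--
--     for i in range(sl):
--         if is_alpha_num(s[sl - i - 1]):
--             tc += 1
--         else:
--             break
--     return hc, tc
-- ===== SOURCE B (Python) =====
-- import re
--
-- def with_numalp(s):
--     hc = re.match(r'[0-9A-Za-z]*', s).end()
--     tc = len(re.search(r'[0-9A-Za-z]*\Z', s).group())
--     return hc, tc
-- ===== Notes on version B (the rewrite author's own statement) =====
-- stated objective: idiomatic
-- what changed: Replaced the two index-based scanning loops with break by two anchored regex matches ([0-9A-Za-z]* at the start, [0-9A-Za-z]*\Z at the end) whose match lengths give the counts.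
import Mathlib
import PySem

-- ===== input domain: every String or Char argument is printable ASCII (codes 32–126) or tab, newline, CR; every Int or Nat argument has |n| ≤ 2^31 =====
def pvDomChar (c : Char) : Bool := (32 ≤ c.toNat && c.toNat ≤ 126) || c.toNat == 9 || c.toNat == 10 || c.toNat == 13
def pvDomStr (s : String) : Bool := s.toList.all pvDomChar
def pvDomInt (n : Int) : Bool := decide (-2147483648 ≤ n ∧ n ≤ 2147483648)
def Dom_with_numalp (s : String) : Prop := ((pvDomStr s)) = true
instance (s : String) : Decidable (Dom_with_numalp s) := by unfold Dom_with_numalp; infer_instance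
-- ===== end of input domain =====

-- B replaces the two index-loops-with-break by two anchored regex matches (idiomatic, same cost).

-- ===== PORT A =====
def is_number_char (c : Char) : Bool := '0' ≤ c && c ≤ '9'
def is_english_lc (c : Char) : Bool := 'a' ≤ c && c ≤ 'z'
def is_english_cl (c : Char) : Bool := 'A' ≤ c && c ≤ 'Z'
def is_alpha_num (c : Char) : Bool := is_number_char c || is_english_lc c || is_english_cl c

-- the first loop: walk forward counting until a non-alnum char (break)
def withNumalpHead : List Char → Int
  | [] => 0
  | c :: cs => if is_alpha_num c then withNumalpHead cs + 1 else 0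

-- the second loop: indices sl-i-1 walk the string from the back; transliterated as a scan of the reversed list
def withNumalpTail : List Char → Int
  | [] => 0
  | c :: cs => if is_alpha_num c then withNumalpTail cs + 1 else 0

def with_numalp (s : String) : Int × Int :=
  (withNumalpHead s.toList, withNumalpTail s.toList.reverse)

-- ===== PORT B =====
-- regex class [0-9A-Za-z], exactly B's character class
def altClass (c : Char) : Bool := ('0' ≤ c && c ≤ '9') || ('A' ≤ c && c ≤ 'Z') || ('a' ≤ c && c ≤ 'z')

-- re.match(r'[0-9A-Za-z]*', s).end(): length of the maximal leading run = takeWhile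
-- re.search(r'[0-9A-Za-z]*\Z', s): the maximal trailing run = takeWhile on the reverse
def with_numalp_alt (s : String) : Int × Int :=
  ((s.toList.takeWhile altClass).length, (s.toList.reverse.takeWhile altClass).length)

-- ===== PRECONDITION & SPEC =====
def Spec_with_numalp (s : String) (out : Int × Int) : Prop := out = with_numalp_alt s
instance (s : String) (out : Int × Int) : Decidable (Spec_with_numalp s out) := by unfold Spec_with_numalp; infer_instance

-- ===== CLAIM (what is proved, stated in full; the proofs are below) =====
def Claim_equal_with_numalp : Prop := ∀ (s : String), Dom_with_numalp s → Spec_with_numalp s (with_numalp s)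

-- ===== LEMMAS AND PROOFS =====
theorem pred_eq (c : Char) : is_alpha_num c = altClass c := by
  simp only [is_alpha_num, altClass, is_number_char, is_english_lc, is_english_cl]
  ac_rfl

theorem head_eq_takeWhile (l : List Char) :
    withNumalpHead l = ((l.takeWhile altClass).length : Int) := by
  induction l with
  | nil => simp [withNumalpHead]
  | cons c cs ih =>
    rw [withNumalpHead, pred_eq, List.takeWhile_cons]
    split <;> simp_all

theorem tail_eq_head (l : List Char) : withNumalpTail l = withNumalpHead l := by
  induction l with
  | nil => rfl
  | cons c cs ih => rw [withNumalpTail, withNumalpHead, ih]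

-- ===== VERDICT (by name: the statement is the Claim_ definition above) =====
theorem with_numalp_spec : Claim_equal_with_numalp := by
  intro s _
  unfold Spec_with_numalp with_numalp with_numalp_alt
  rw [tail_eq_head, head_eq_takeWhile, head_eq_takeWhile]
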